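-- pv_equiv track=rewrite | github.com/grimmi/learnpython | primewithevendigits.py | f
-- ===== SOURCE A (Python) =====
-- def count_even_digits(n):
--     return sum((str(n).count(x) for x in ['0', '2', '4', '6', '8']))
--
-- def prime_sieve(n):
--     sieve = [True]*(n+1)
--
--     sieve[0] = False
--     sieve[1] = False
--
--     for x in range(2, n + 1):
--         if not sieve[x]:
--             continue
--
--         for z in range(x + x, n + 1, x):
--             sieve[z] = False
--
--     primes = []
--     for p in range(0, n + 1):
--         if sieve[p]: primes.append(p)
--
--     return primes
--
-- def f(n):
--     max_prime = 2
--     max_even_count = 1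
--     primes = prime_sieve(n)
--     for x in primes:
--         digitcount = count_even_digits(x)
--         if x > max_prime and digitcount >= max_even_count:
--             max_even_count = digitcount
--             max_prime = x
--     return max_prime
-- ===== SOURCE B (Python) =====
-- def count_even_digits(n):
--     return sum((str(n).count(x) for x in ['0', '2', '4', '6', '8']))
--
-- def is_prime(m):
--     d = 2
--     while d * d <= m:
--         if m % d == 0:
--             return False
--         d += 1
--     return m >= 2
--
-- def f(n):
--     # trial division instead of a sieve
--     primes = [p for p in range(2, n + 1) if is_prime(p)]
--     # two explicit passes: the maximal even-digit count, then the last prime attaining it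
--     m = 1
--     for p in primes:
--         m = max(m, count_even_digits(p))
--     best = 2
--     for p in primes:
--         if count_even_digits(p) == m:
--             best = p
--     return best
-- ===== Notes on version B (the rewrite author's own statement) =====
-- stated objective: alternative
-- what changed: B finds the primes by trial division (an is_prime test filtered over the range) instead of A's Eratosthenes boolean-array sieve, and replaces A's single-pass running-threshold selection by two explicit passes: first the maximal even-digit count over the primes, then the last (= largest) prime attaining it.
import Mathlib
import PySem

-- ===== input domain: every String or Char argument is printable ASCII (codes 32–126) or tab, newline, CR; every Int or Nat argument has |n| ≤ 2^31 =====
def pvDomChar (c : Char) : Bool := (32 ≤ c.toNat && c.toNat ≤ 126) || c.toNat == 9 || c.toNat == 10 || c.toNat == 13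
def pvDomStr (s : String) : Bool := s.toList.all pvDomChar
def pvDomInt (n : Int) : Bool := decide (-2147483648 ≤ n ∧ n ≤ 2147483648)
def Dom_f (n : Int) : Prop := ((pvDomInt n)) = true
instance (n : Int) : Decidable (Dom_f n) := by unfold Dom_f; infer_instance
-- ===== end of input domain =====

-- B finds the primes by trial division instead of A's boolean-array sieve and selects the
-- answer in two explicit passes (max even-digit count, then the last prime attaining it)
-- instead of A's running-threshold scan; same value on n ≥ 1.

-- ===== PORT A =====
-- helper: count_even_digits (identical in Source A and Source B)
def countEvenDigits (n : Int) : Int :=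
  (["0", "2", "4", "6", "8"].map
    (fun x => ((PySem.Str.count (PySem.Int.toStr n) x : Nat) : Int))).sum

-- Python list read / write on the sieve array, hand-ported over Array for O(1) evaluation:
-- exact for the nonnegative indices this sieve uses (under Pre_f every index Python touches
-- is nonnegative and in range, where these agree with Python's sieve[i] / sieve[i] = v)
def pyArrGet (a : Array Bool) (i : Int) (d : Bool) : Bool :=
  if 0 ≤ i then (a[i.toNat]?).getD d else d

def pyArrSet (a : Array Bool) (i : Int) (v : Bool) : Array Bool :=
  if 0 ≤ i then a.setIfInBounds i.toNat v else a

-- helper: prime_sieve (A only)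
def primeSieve (n : Int) : List Int :=
  let sieve := Array.replicate (n + 1).toNat true
  let sieve := pyArrSet sieve 0 false
  let sieve := pyArrSet sieve 1 false
  let sieve := (PySem.List.pyRange 2 (n + 1) 1).foldl
    (fun sv x =>
      if pyArrGet sv x false = false then sv
      else (PySem.List.pyRange (x + x) (n + 1) x).foldl
        (fun sv2 z => pyArrSet sv2 z false) sv)
    sieve
  (PySem.List.pyRange 0 (n + 1) 1).foldl
    (fun acc p => if pyArrGet sieve p false then acc ++ [p] else acc) []

def f (n : Int) : Int :=
  let primes := primeSieve n
  (primes.foldl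
    (fun (st : Int × Int) x =>
      let digitcount := countEvenDigits x
      if x > st.1 ∧ digitcount ≥ st.2 then (x, digitcount) else st)
    (2, 1)).1

-- ===== PORT B =====
-- helper: is_prime (B only), the `while d * d <= m` trial-division loop
def isPrimeAux (m d : Int) : Bool :=
  if d * d ≤ m then
    if PySem.Int.mod m d = 0 then false
    else isPrimeAux m (d + 1)
  else decide (2 ≤ m)
termination_by (m + 1 - d).toNat
decreasing_by
  rename_i h _
  have hge : 2 * d - 1 ≤ m := by nlinarith [mul_self_nonneg (d - 1)]
  have h0 : 0 ≤ m := by nlinarith [mul_self_nonneg d]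
  omega

def isPrime (m : Int) : Bool := isPrimeAux m 2

def f_alt (n : Int) : Int :=
  let primes := (PySem.List.pyRange 2 (n + 1) 1).filter (fun p => isPrime p)
  let m := primes.foldl (fun m p => max m (countEvenDigits p)) 1
  primes.foldl (fun best p => if countEvenDigits p = m then p else best) 2

-- ===== PRECONDITION & SPEC =====
-- Pre_f excludes exactly n ≤ 0, where A raises IndexError in prime_sieve.
def Pre_f (n : Int) : Prop := 1 ≤ n
instance (n : Int) : Decidable (Pre_f n) := by unfold Pre_f; infer_instance
def pvWitness_f : Int := 25

def Spec_f (n : Int) (out : Int) : Prop := out = f_alt n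
instance (n : Int) (out : Int) : Decidable (Spec_f n out) := by unfold Spec_f; infer_instance

-- ===== CLAIM (what is proved, stated in full; the proofs are below) =====
def Claim_equal_f : Prop := ∀ (n : Int), Dom_f n → Pre_f n → Spec_f n (f n)

-- ===== LEMMAS AND PROOFS =====

-- pointwise facts about the array writes (all indices in play are ≥ 0)
theorem size_pyArrSet (a : Array Bool) (i : Int) (v : Bool) :
    (pyArrSet a i v).size = a.size := by
  unfold pyArrSet
  split <;> simp

theorem pyArrGet_set_false_self (a : Array Bool) (i : Int) (hi : 0 ≤ i) :
    pyArrGet (pyArrSet a i false) i false = false := by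
  unfold pyArrGet pyArrSet
  rw [if_pos hi, if_pos hi, Array.getElem?_setIfInBounds_self]
  split <;> simp

theorem pyArrGet_set_ne (a : Array Bool) (z i : Int) (v d : Bool) (hi : 0 ≤ i) (hz : 0 ≤ z)
    (hne : i ≠ z) :
    pyArrGet (pyArrSet a z v) i d = pyArrGet a i d := by
  unfold pyArrGet pyArrSet
  rw [if_pos hi, if_pos hi, if_pos hz, Array.getElem?_setIfInBounds_ne (by omega)]

-- the inner marking loop, pointwise: i reads `false` iff it is marked now or read `false` before
theorem foldl_arrSetFalse_get (L : List Int) (hL : ∀ z ∈ L, 0 ≤ z) (a : Array Bool)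
    (i : Int) (hi : 0 ≤ i) :
    pyArrGet (L.foldl (fun s z => pyArrSet s z false) a) i false =
      if i ∈ L then false else pyArrGet a i false := by
  induction L generalizing a with
  | nil => simp
  | cons z t ih =>
    have hz : 0 ≤ z := hL z (by simp)
    have ht : ∀ w ∈ t, 0 ≤ w := fun w hw => hL w (by simp [hw])
    simp only [List.foldl_cons]
    rw [ih ht _]
    by_cases hzi : i = z
    · subst hzi
      by_cases hit : i ∈ t
      · simp [hit]
      · simp [hit, pyArrGet_set_false_self a i hi]
    · rw [pyArrGet_set_ne _ _ _ _ _ hi hz hzi]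
      simp [List.mem_cons, hzi]

-- "i has a proper divisor d with 2 ≤ d < y"
def HasSmallFac (y i : Int) : Prop := ∃ d, 2 ≤ d ∧ d < y ∧ d ∣ i ∧ d ≠ i

-- the sieve invariant: after the outer loop has processed the values 2, …, y-1,
-- cell i (0 ≤ i < n+1) reads true iff 2 ≤ i and i has no proper divisor below y
def SieveInv (n y : Int) (a : Array Bool) : Prop :=
  a.size = (n + 1).toNat ∧
  ∀ i : Int, 0 ≤ i → i < n + 1 → (pyArrGet a i false = true ↔ (2 ≤ i ∧ ¬ HasSmallFac y i))

theorem sieveInv_init (n : Int) (hn : 1 ≤ n) :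
    SieveInv n 2
      (pyArrSet (pyArrSet (Array.replicate (n + 1).toNat true) 0 false) 1 false) := by
  constructor
  · rw [size_pyArrSet, size_pyArrSet, Array.size_replicate]
  · intro i hi0 hin
    by_cases h1 : i = 1
    · subst h1
      rw [pyArrGet_set_false_self _ _ (by omega)]
      simp
    · by_cases h0 : i = 0
      · subst h0
        rw [pyArrGet_set_ne _ _ _ _ _ (by omega) (by omega) (by omega),
          pyArrGet_set_false_self _ _ (by omega)]
        simp
      · rw [pyArrGet_set_ne _ _ _ _ _ hi0 (by omega) (by omega),
          pyArrGet_set_ne _ _ _ _ _ hi0 (by omega) (by omega)]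
        unfold pyArrGet
        rw [if_pos hi0, Array.getElem?_replicate, if_pos (by omega)]
        simp only [Option.getD_some, true_iff]
        constructor
        · omega
        · rintro ⟨d, hd2, hdy, _, _⟩
          omega

theorem size_foldl_arrSet (L : List Int) (a : Array Bool) :
    (L.foldl (fun s z => pyArrSet s z false) a).size = a.size := by
  induction L generalizing a with
  | nil => rfl
  | cons z t ih =>
    simp only [List.foldl_cons]
    rw [ih, size_pyArrSet]

theorem sieveInv_step (n x : Int) (hx2 : 2 ≤ x) (hxn : x < n + 1) (a : Array Bool)
    (h : SieveInv n x a) :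
    SieveInv n (x + 1)
      (if pyArrGet a x false = false then a
       else (PySem.List.pyRange (x + x) (n + 1) x).foldl
         (fun sv2 z => pyArrSet sv2 z false) a) := by
  obtain ⟨hsz, h⟩ := h
  by_cases hb : pyArrGet a x false = false
  · -- x already marked: x has a proper divisor d₀ < x, so every proper multiple of x
    -- already has the proper divisor d₀ < x as well
    rw [if_pos hb]
    have hxfac : HasSmallFac x x := by
      by_contra hc
      have := (h x (by omega) hxn).mpr ⟨hx2, hc⟩
      simp [hb] at this
    obtain ⟨d₀, hd₀2, hd₀x, hd₀dvd, _⟩ := hxfac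
    refine ⟨hsz, fun i hi0 hin => (h i hi0 hin).trans ?_⟩
    constructor
    · rintro ⟨hi2, hno⟩
      refine ⟨hi2, fun ⟨d, hd2, hdy, hddvd, hdne⟩ => ?_⟩
      by_cases hdx : d = x
      · subst hdx
        refine hno ⟨d₀, hd₀2, hd₀x, hd₀dvd.trans hddvd, ?_⟩
        have : d ≤ i := Int.le_of_dvd (by omega) hddvd
        omega
      · exact hno ⟨d, hd2, by omega, hddvd, hdne⟩
    · rintro ⟨hi2, hno⟩
      exact ⟨hi2, fun ⟨d, hd2, hdy, hddvd, hdne⟩ => hno ⟨d, hd2, by omega, hddvd, hdne⟩⟩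
  · -- x unmarked: the inner loop marks exactly the proper multiples of x below n+1
    rw [if_neg hb]
    refine ⟨by rw [size_foldl_arrSet]; exact hsz, ?_⟩
    intro i hi0 hin
    have hdvdiff : x ∣ i - (x + x) ↔ x ∣ i := by
      have hxx : x ∣ x + x := ⟨2, by ring⟩
      constructor
      · intro hdv
        have := dvd_add hdv hxx
        simpa using this
      · intro hdv
        exact dvd_sub hdv hxx
    have hzL : ∀ z ∈ PySem.List.pyRange (x + x) (n + 1) x, 0 ≤ z := by
      intro z hz
      have := (PySem.List.mem_pyRange_iff_of_pos (by omega) z).mp hz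
      omega
    rw [foldl_arrSetFalse_get _ hzL a i hi0]
    by_cases hiR : i ∈ PySem.List.pyRange (x + x) (n + 1) x
    · obtain ⟨hge, hlt', hdvd'⟩ := (PySem.List.mem_pyRange_iff_of_pos (by omega) i).mp hiR
      have hfac : HasSmallFac (x + 1) i := ⟨x, hx2, by omega, hdvdiff.mp hdvd', by omega⟩
      simp [hiR, hfac]
    · rw [if_neg hiR, h i hi0 hin]
      constructor
      · rintro ⟨hi2, hno⟩
        refine ⟨hi2, fun ⟨d, hd2, hdy, hdd, hdn⟩ => ?_⟩
        by_cases hdx : d = x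
        · subst hdx
          have hine : ¬ (d + d ≤ i) := fun hge =>
            hiR ((PySem.List.mem_pyRange_iff_of_pos (by omega) i).mpr
              ⟨hge, hin, hdvdiff.mpr hdd⟩)
          obtain ⟨k, hk⟩ := hdd
          have hkpos : 1 ≤ k := by nlinarith
          have hk1 : k = 1 := by nlinarith
          rw [hk1, mul_one] at hk
          omega
        · exact hno ⟨d, hd2, by omega, hdd, hdn⟩
      · rintro ⟨hi2, hno⟩
        exact ⟨hi2, fun ⟨d, hd2, hdy, hdd, hdn⟩ => hno ⟨d, hd2, by omega, hdd, hdn⟩⟩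

theorem sieveInv_range (n : Int) (k : Nat) (y : Int) (hy : 2 ≤ y) (hyn : y ≤ n + 1)
    (hk : (n + 1 - y).toNat = k) (a : Array Bool) (h : SieveInv n y a) :
    SieveInv n (n + 1)
      ((PySem.List.pyRange y (n + 1) 1).foldl
        (fun sv x =>
          if pyArrGet sv x false = false then sv
          else (PySem.List.pyRange (x + x) (n + 1) x).foldl
            (fun sv2 z => pyArrSet sv2 z false) sv) a) := by
  induction k generalizing y a with
  | zero =>
    have hy' : y = n + 1 := by omega
    subst hy'
    rw [PySem.List.pyRange_one]
    simp only [show ((n + 1) - (n + 1)).toNat = 0 from by omega, List.range_zero,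
      List.map_nil, List.foldl_nil]
    exact h
  | succ k ih =>
    have hyn : y < n + 1 := by omega
    rw [PySem.List.pyRange_one_cons hyn, List.foldl_cons]
    exact ih (y + 1) (by omega) (by omega) (by omega) _ (sieveInv_step n y hy hyn a h)

theorem primeSieve_eq_filter (n : Int) :
    primeSieve n = (PySem.List.pyRange 0 (n + 1) 1).filter
      (fun p => pyArrGet ((PySem.List.pyRange 2 (n + 1) 1).foldl
        (fun sv x =>
          if pyArrGet sv x false = false then sv
          else (PySem.List.pyRange (x + x) (n + 1) x).foldl
            (fun sv2 z => pyArrSet sv2 z false) sv)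
        (pyArrSet (pyArrSet (Array.replicate (n + 1).toNat true) 0 false) 1 false))
        p false) := by
  unfold primeSieve
  rw [PySem.List.foldl_append_if_eq_filter]
  simp

-- any proper divisor yields one below the square root, and conversely
theorem smallfac_sqrt (p : Int) (hp : 2 ≤ p) :
    (∃ d, 2 ≤ d ∧ d ∣ p ∧ d ≠ p) ↔ (∃ e, 2 ≤ e ∧ e * e ≤ p ∧ e ∣ p) := by
  constructor
  · rintro ⟨d, hd2, hdvd, hdne⟩
    have hdp : d ≤ p := Int.le_of_dvd (by omega) hdvd
    obtain ⟨k, hk⟩ := hdvd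
    have hkpos : 1 ≤ k := by nlinarith
    have hk2 : 2 ≤ k := by
      rcases eq_or_lt_of_le hkpos with h1 | h1
      · exfalso
        rw [← h1, mul_one] at hk
        omega
      · omega
    by_cases hsq : d * d ≤ p
    · exact ⟨d, hd2, hsq, ⟨k, hk⟩⟩
    · refine ⟨k, hk2, by nlinarith, ⟨d, by rw [hk]; ring⟩⟩
  · rintro ⟨e, he2, hsq, hdvd⟩
    refine ⟨e, he2, hdvd, fun he => ?_⟩
    rw [he] at hsq
    nlinarith

-- the characterisation of the trial-division loop
theorem isPrimeAux_eq (m d : Int) (hd : 2 ≤ d) :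
    isPrimeAux m d = true ↔ (2 ≤ m ∧ ∀ e, d ≤ e → e * e ≤ m → ¬ e ∣ m) := by
  generalize hk : (m + 1 - d).toNat = k
  induction k generalizing d with
  | zero =>
    have hmd : m < d := by omega
    rw [isPrimeAux, if_neg (by nlinarith)]
    simp only [decide_eq_true_eq]
    constructor
    · intro h2
      refine ⟨h2, fun e he hee hdv => ?_⟩
      have : d * d ≤ e * e := mul_le_mul he he (by omega) (by omega)
      nlinarith
    · exact fun h => h.1
  | succ k ih =>
    rw [isPrimeAux]
    by_cases hdd : d * d ≤ m
    · rw [if_pos hdd]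
      by_cases hmod : PySem.Int.mod m d = 0
      · rw [if_pos hmod]
        have hdvd : d ∣ m := (PySem.Int.mod_eq_zero_iff_dvd m d).mp hmod
        simp only [Bool.false_eq_true, false_iff]
        rintro ⟨h2, hall⟩
        exact hall d le_rfl hdd hdvd
      · rw [if_neg hmod]
        have hmd : ¬ d ∣ m := fun hdv => hmod ((PySem.Int.mod_eq_zero_iff_dvd m d).mpr hdv)
        have h2m : 2 ≤ m := by nlinarith
        rw [ih (d + 1) (by omega) (by omega)]
        constructor
        · rintro ⟨_, hall⟩
          refine ⟨h2m, fun e he hee hdv => ?_⟩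
          rcases eq_or_lt_of_le he with heq | hlt
          · exact hmd (heq ▸ hdv)
          · exact hall e (by omega) hee hdv
        · rintro ⟨_, hall⟩
          exact ⟨h2m, fun e he hee hdv => hall e (by omega) hee hdv⟩
    · rw [if_neg hdd]
      simp only [decide_eq_true_eq]
      constructor
      · intro h2
        refine ⟨h2, fun e he hee hdv => ?_⟩
        have : d * d ≤ e * e := mul_le_mul he he (by omega) (by omega)
        nlinarith
      · exact fun h => h.1

theorem pyRange_sorted (a b : Int) : (PySem.List.pyRange a b 1).Pairwise (· < ·) := by
  rw [PySem.List.pyRange_one, List.pairwise_map]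
  have himp : ∀ x y : Nat, x < y → a + (x : Int) < a + (y : Int) := by
    intro x y h; omega
  exact List.Pairwise.imp (fun {x y} h => himp x y h) List.pairwise_lt_range

-- A's prime list equals B's trial-division filter
theorem primes_eq (n : Int) (hn : 1 ≤ n) :
    (PySem.List.pyRange 2 (n + 1) 1).filter (fun p => isPrime p) = primeSieve n := by
  rw [primeSieve_eq_filter]
  have hinv := sieveInv_range n (n + 1 - 2).toNat 2 le_rfl (by omega) rfl _ (sieveInv_init n hn)
  generalize hA : (PySem.List.pyRange 2 (n + 1) 1).foldl
      (fun sv x =>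
        if pyArrGet sv x false = false then sv
        else (PySem.List.pyRange (x + x) (n + 1) x).foldl
          (fun sv2 z => pyArrSet sv2 z false) sv)
      (pyArrSet (pyArrSet (Array.replicate (n + 1).toNat true) 0 false) 1 false) = A
    at hinv ⊢
  have hget0 : pyArrGet A 0 false = false := by
    cases hb : pyArrGet A 0 false with
    | false => rfl
    | true =>
      have := (hinv.2 0 le_rfl (by omega)).mp hb
      omega
  have hget1 : pyArrGet A 1 false = false := by
    cases hb : pyArrGet A 1 false with
    | false => rfl
    | true =>
      have := (hinv.2 1 (by omega) (by omega)).mp hb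
      omega
  rw [PySem.List.pyRange_one_cons (show (0:Int) < n + 1 by omega),
    show (0:Int) + 1 = 1 from by norm_num,
    PySem.List.pyRange_one_cons (show (1:Int) < n + 1 by omega),
    show (1:Int) + 1 = 2 from by norm_num,
    List.filter_cons, List.filter_cons]
  simp only [hget0, hget1, Bool.false_eq_true, if_false]
  apply List.filter_congr
  intro p hp
  obtain ⟨hp2, hpn⟩ := PySem.List.mem_pyRange_one.mp hp
  have hiffA := hinv.2 p (by omega) hpn
  have hiffB := isPrimeAux_eq p 2 le_rfl
  have hbridge : (¬ HasSmallFac (n + 1) p) ↔ (∀ e, 2 ≤ e → e * e ≤ p → ¬ e ∣ p) := by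
    unfold HasSmallFac
    rw [show (∃ d, 2 ≤ d ∧ d < n + 1 ∧ d ∣ p ∧ d ≠ p) ↔ (∃ d, 2 ≤ d ∧ d ∣ p ∧ d ≠ p) from
      ⟨fun ⟨d, h1, _, h3, h4⟩ => ⟨d, h1, h3, h4⟩,
       fun ⟨d, h1, h3, h4⟩ => ⟨d, h1, by
         have := Int.le_of_dvd (by omega) h3
         omega, h3, h4⟩⟩,
      smallfac_sqrt p hp2]
    constructor
    · intro h e he hee hdv
      exact h ⟨e, he, hee, hdv⟩
    · rintro h ⟨e, he, hee, hdv⟩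
      exact h e he hee hdv
  show isPrime p = pyArrGet A p false
  cases hb : pyArrGet A p false with
  | true =>
    have hno := (hiffA.mp hb).2
    exact hiffB.mpr ⟨hp2, hbridge.mp hno⟩
  | false =>
    cases hc : isPrime p with
    | false => rfl
    | true =>
      have := hiffA.mpr ⟨hp2, hbridge.mpr ((hiffB.mp hc).2)⟩
      rw [hb] at this
      exact this.symm

theorem primeSieve_sorted (n : Int) (hn : 1 ≤ n) : (primeSieve n).Pairwise (· < ·) := by
  rw [← primes_eq n hn]
  exact (pyRange_sorted 2 (n + 1)).filter _

theorem primeSieve_ge_two (n : Int) (hn : 1 ≤ n) : ∀ x ∈ primeSieve n, 2 ≤ x := by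
  intro x hx
  rw [← primes_eq n hn, List.mem_filter] at hx
  exact (PySem.List.mem_pyRange_one.mp hx.1).1

-- the selection fold returns its seed or an element of the list
theorem pick_mem (cnt : Int → Int) (m : Int) (L : List Int) (b : Int) :
    L.foldl (fun best p => if cnt p = m then p else best) b = b ∨
    L.foldl (fun best p => if cnt p = m then p else best) b ∈ L := by
  induction L generalizing b with
  | nil => left; rfl
  | cons a t ih =>
    simp only [List.foldl_cons]
    rcases ih (if cnt a = m then a else b) with h | h
    · rw [h]; split_ifs with hc
      · right; simp
      · left; rfl
    · right; simp [h]

-- a running `max` loop is the `if c > m` loop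
theorem max_fold_eq (cnt : Int → Int) (L : List Int) (a : Int) :
    L.foldl (fun m p => max m (cnt p)) a
      = L.foldl (fun m p => let c := cnt p; if c > m then c else m) a := by
  induction L generalizing a with
  | nil => rfl
  | cons x t ih =>
    simp only [List.foldl_cons]
    rw [show max a (cnt x) = (let c := cnt x; if c > a then c else a) from by
      simp only [max_def]; split_ifs <;> omega]
    exact ih _

-- main lemma: A's running-threshold scan equals B's two passes on any strictly
-- increasing list of integers ≥ 2, for any digit-count function with cnt 2 = 1
theorem loop_equiv (cnt : Int → Int) (hcnt : cnt 2 = 1)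
    (L : List Int) (hs : L.Pairwise (· < ·)) (h2 : ∀ x ∈ L, 2 ≤ x) :
    L.foldl
      (fun (st : Int × Int) x =>
        let digitcount := cnt x
        if x > st.1 ∧ digitcount ≥ st.2 then (x, digitcount) else st)
      (2, 1)
    = (L.foldl (fun best p =>
          if cnt p = L.foldl (fun m p => let c := cnt p; if c > m then c else m) 1
          then p else best) 2,
       L.foldl (fun m p => let c := cnt p; if c > m then c else m) 1) := by
  induction L using List.reverseRecOn with
  | nil => simp
  | append_singleton L a ih =>
    have hsplit := List.pairwise_append.mp hs
    have hsL : L.Pairwise (· < ·) := hsplit.1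
    have hlt : ∀ x ∈ L, x < a := fun x hx => hsplit.2.2 x hx a (by simp)
    have h2L : ∀ x ∈ L, 2 ≤ x := fun x hx => h2 x (by simp [hx])
    have ha2 : 2 ≤ a := h2 a (by simp)
    by_cases ha : a = 2
    · have hLnil : L = [] := by
        cases L with
        | nil => rfl
        | cons y t =>
          exfalso
          have h1 := hlt y (by simp)
          have h2y := h2L y (by simp)
          omega
      subst hLnil; subst ha
      simp only [List.nil_append, List.foldl_cons, List.foldl_nil, hcnt]
      norm_num
    · have hgt : ∀ m : Int,
          L.foldl (fun best p => if cnt p = m then p else best) 2 < a := by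
        intro m
        rcases pick_mem cnt m L 2 with h | h
        · rw [h]; omega
        · exact hlt _ h
      simp only [List.foldl_append, List.foldl_cons, List.foldl_nil, ih hsL h2L]
      generalize hC : cnt a = C
      generalize hM : L.foldl (fun m p => let c := cnt p; if c > m then c else m) 1 = M
      rcases lt_trichotomy C M with hc | hc | hc
      · have hm' : (let c := C; if c > M then c else M) = M := if_neg (by omega)
        simp only [hm']
        generalize hP : L.foldl (fun best p => if cnt p = M then p else best) 2 = P
        rw [if_neg (by omega), if_neg (by omega)]
      · have hm' : (let c := C; if c > M then c else M) = M := if_neg (by omega)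
        simp only [hm']
        have hPa : L.foldl (fun best p => if cnt p = M then p else best) 2 < a := hgt M
        generalize hP : L.foldl (fun best p => if cnt p = M then p else best) 2 = P at hPa ⊢
        rw [if_pos ⟨hPa, by omega⟩, if_pos hc, hc]
      · have hm' : (let c := C; if c > M then c else M) = C := if_pos (by omega)
        simp only [hm']
        have hPa : L.foldl (fun best p => if cnt p = M then p else best) 2 < a := hgt M
        generalize hP : L.foldl (fun best p => if cnt p = M then p else best) 2 = P at hPa ⊢
        generalize hQ : L.foldl (fun best p => if cnt p = C then p else best) 2 = Q
        rw [if_pos ⟨hPa, by omega⟩]; simp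

-- ===== VERDICT (by name: the statement is the Claim_ definition above) =====
theorem f_spec : Claim_equal_f := by
  intro n _ hpre
  unfold Spec_f f f_alt
  have h := loop_equiv countEvenDigits (by decide) (primeSieve n)
    (primeSieve_sorted n hpre) (primeSieve_ge_two n hpre)
  simp only [primes_eq n hpre, max_fold_eq countEvenDigits, h]
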